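-- pv_equiv track=rewrite | github.com/Bese3/frontend-projects | FINET_TASK/src/util.py | population_rounder
-- ===== SOURCE A (Python) =====
-- def population_rounder(population):
--     """
--     population_rounder takes a population number, rounds it to the
--     nearest hundred, thousand, million, or billion, and appends
--     the corresponding suffix (H, K, M, B) based on the magnitude
--     of the number.
--     """
--     if not population:
--         raise ValueError("Population must not be empty")
--     if not isinstance(population, int):
--         raise TypeError("Population must be int type")
--
--     num_mark = {
--         100: 'H',
--         1000: 'K',
--         1000000: 'M',
--         1000000000: 'B'
--     }
--     pop_str = ""
--     key_list = list(num_mark.keys())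
--     for index, value in enumerate(key_list):
--         try:
--             if population >= value and population < key_list[index + 1]:
--                 pop_str = f"{round(population / value)}{num_mark.get(value)}"
--                 break
--             continue
--         except IndexError:
--             pop_str = f"{round(population / 1000000000)}B"
--             break
--     else:
--         pop_str = str(population)
--
--     return pop_str
-- ===== SOURCE B (Python) =====
-- def population_rounder(population):
--     """
--     population_rounder takes a population number, rounds it to the
--     nearest hundred, thousand, million, or billion, and appends
--     the corresponding suffix (H, K, M, B) based on the magnitude
--     of the number.
--     """
--     if not population:
--         raise ValueError("Population must not be empty")
--     if not isinstance(population, int):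
--         raise TypeError("Population must be int type")
--
--     if population < 100:
--         return str(population)
--
--     # compute the decimal magnitude of the number instead of scanning thresholds
--     t, digits = population, 0
--     while t > 0:
--         digits += 1
--         t //= 10
--
--     base, suffix = {3: (100, 'H'),
--                     4: (1000, 'K'), 5: (1000, 'K'), 6: (1000, 'K'),
--                     7: (1000000, 'M'), 8: (1000000, 'M'), 9: (1000000, 'M')
--                     }.get(digits, (1000000000, 'B'))
--     return f"{round(population / base)}{suffix}"
-- ===== Notes on version B (the rewrite author's own statement) =====
-- stated objective: alternative
-- what changed: Instead of scanning the threshold table and comparing the population against each bound (A's ascending enumerate scan with next-key lookup and IndexError-handled top bucket), B computes the number's decimal magnitude with a digit-counting division loop and maps that digit count through a table to the (base, suffix) pair, so the population itself is never compared against any threshold except the <100 guard.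
import Mathlib
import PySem

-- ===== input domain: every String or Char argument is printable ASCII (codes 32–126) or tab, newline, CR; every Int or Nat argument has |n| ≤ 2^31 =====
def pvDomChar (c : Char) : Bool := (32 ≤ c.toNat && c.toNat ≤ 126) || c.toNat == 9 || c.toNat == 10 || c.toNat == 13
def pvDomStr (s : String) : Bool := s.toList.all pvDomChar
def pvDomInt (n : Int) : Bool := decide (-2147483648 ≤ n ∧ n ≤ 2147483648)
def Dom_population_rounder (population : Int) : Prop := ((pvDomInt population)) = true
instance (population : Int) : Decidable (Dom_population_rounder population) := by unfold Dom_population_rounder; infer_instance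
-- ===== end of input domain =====

-- B replaces A's threshold scan (ascending enumerate loop, next-key lookup, IndexError
-- top bucket) by computing the decimal magnitude with a digit-counting loop and mapping
-- the digit count through a table; objective: alternative (same O(1) cost).

-- Exact port of Python's round(population / value) for 0 < q, on the stated domain
-- (|p| ≤ 2^31, q ∈ {100, 10^3, 10^6, 10^9}): there the float division is close enough
-- that round() equals rational round-half-to-even, computed here on integers.
def pyRoundDiv (p q : Int) : Int :=
  let k := PySem.Int.floordiv p q
  let r := PySem.Int.mod p q
  if 2 * r < q then k
  else if q < 2 * r then k + 1
  else if PySem.Int.mod k 2 = 0 then k else k + 1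

-- ===== PORT A =====
-- the for-loop over enumerate(key_list) with its try/except IndexError and for-else
def pvAGo (population : Int) (keyList : List Int) (numMark : PySem.Dict Int String) :
    List (Int × Int) → String
  | [] => PySem.Int.toStr population                    -- for-else: pop_str = str(population)
  | (index, value) :: rest =>
    if population ≥ value then
      -- Python now evaluates key_list[index + 1]; none = IndexError, caught below
      match PySem.List.pyGet? keyList (index + 1) with
      | some next =>
        if population < next then
          PySem.Int.toStr (pyRoundDiv population value) ++ ((PySem.Dict.get? numMark value).getD "None")
        else pvAGo population keyList numMark rest      -- continue
      | none => PySem.Int.toStr (pyRoundDiv population 1000000000) ++ "B"  -- except IndexError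
    else pvAGo population keyList numMark rest          -- short-circuit False → continue

def population_rounder (population : Int) : String :=
  let numMark : PySem.Dict Int String :=
    PySem.Dict.ofList [(100, "H"), (1000, "K"), (1000000, "M"), (1000000000, "B")]
  let keyList : List Int := [100, 1000, 1000000, 1000000000]
  pvAGo population keyList numMark (PySem.List.enumerate keyList)

-- ===== PORT B =====
-- the digit-counting loop: while t > 0: digits += 1; t //= 10
def pvDigits (t : Int) : Int :=
  if h : 0 < t then pvDigits (PySem.Int.floordiv t 10) + 1 else 0
termination_by t.toNat
decreasing_by
  rw [PySem.Int.floordiv_eq_ediv_of_pos (by omega : (0:Int) < 10)]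
  omega

def population_rounder_alt (population : Int) : String :=
  if population < 100 then PySem.Int.toStr population
  else
    let table : PySem.Dict Int (Int × String) :=
      PySem.Dict.ofList [(3, (100, "H")),
                         (4, (1000, "K")), (5, (1000, "K")), (6, (1000, "K")),
                         (7, (1000000, "M")), (8, (1000000, "M")), (9, (1000000, "M"))]
    let bs := (PySem.Dict.get? table (pvDigits population)).getD (1000000000, "B")
    PySem.Int.toStr (pyRoundDiv population bs.1) ++ bs.2

-- ===== PRECONDITION & SPEC =====
-- A raises ValueError on population = 0 ('if not population'); excluded.
def Pre_population_rounder (population : Int) : Prop := population ≠ 0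
instance (population : Int) : Decidable (Pre_population_rounder population) := by
  unfold Pre_population_rounder; infer_instance

def pvWitness_population_rounder : Int := (150)

def Spec_population_rounder (population : Int) (out : String) : Prop := out = population_rounder_alt population
instance (population : Int) (out : String) : Decidable (Spec_population_rounder population out) := by unfold Spec_population_rounder; infer_instance

-- ===== CLAIM (what is proved, stated in full; the proofs are below) =====
def Claim_equal_population_rounder : Prop := ∀ (population : Int), Dom_population_rounder population → Pre_population_rounder population → Spec_population_rounder population (population_rounder population)

-- ===== LEMMAS AND PROOFS =====

lemma pvDigits_nonpos {t : Int} (h : t ≤ 0) : pvDigits t = 0 := by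
  rw [pvDigits]; simp [show ¬ 0 < t by omega]

lemma pvDigits_step {t : Int} (h : 0 < t) : pvDigits t = pvDigits (t / 10) + 1 := by
  rw [pvDigits, PySem.Int.floordiv_eq_ediv_of_pos (by omega : (0:Int) < 10)]
  simp [h]

lemma pvDigits_1 {t : Int} (h1 : 1 ≤ t) (h2 : t < 10) : pvDigits t = 1 := by
  rw [pvDigits_step (by omega), show t / 10 = 0 by omega, pvDigits_nonpos le_rfl]; norm_num

lemma pvDigits_2 {t : Int} (h1 : 10 ≤ t) (h2 : t < 100) : pvDigits t = 2 := by
  rw [pvDigits_step (by omega), pvDigits_1 (by omega) (by omega)]; norm_num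

lemma pvDigits_3 {t : Int} (h1 : 100 ≤ t) (h2 : t < 1000) : pvDigits t = 3 := by
  rw [pvDigits_step (by omega), pvDigits_2 (by omega) (by omega)]; norm_num

lemma pvDigits_4 {t : Int} (h1 : 1000 ≤ t) (h2 : t < 10000) : pvDigits t = 4 := by
  rw [pvDigits_step (by omega), pvDigits_3 (by omega) (by omega)]; norm_num

lemma pvDigits_5 {t : Int} (h1 : 10000 ≤ t) (h2 : t < 100000) : pvDigits t = 5 := by
  rw [pvDigits_step (by omega), pvDigits_4 (by omega) (by omega)]; norm_num

lemma pvDigits_6 {t : Int} (h1 : 100000 ≤ t) (h2 : t < 1000000) : pvDigits t = 6 := by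
  rw [pvDigits_step (by omega), pvDigits_5 (by omega) (by omega)]; norm_num

lemma pvDigits_7 {t : Int} (h1 : 1000000 ≤ t) (h2 : t < 10000000) : pvDigits t = 7 := by
  rw [pvDigits_step (by omega), pvDigits_6 (by omega) (by omega)]; norm_num

lemma pvDigits_8 {t : Int} (h1 : 10000000 ≤ t) (h2 : t < 100000000) : pvDigits t = 8 := by
  rw [pvDigits_step (by omega), pvDigits_7 (by omega) (by omega)]; norm_num

lemma pvDigits_9 {t : Int} (h1 : 100000000 ≤ t) (h2 : t < 1000000000) : pvDigits t = 9 := by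
  rw [pvDigits_step (by omega), pvDigits_8 (by omega) (by omega)]; norm_num

lemma pvDigits_10 {t : Int} (h1 : 1000000000 ≤ t) (h2 : t < 10000000000) : pvDigits t = 10 := by
  rw [pvDigits_step (by omega), pvDigits_9 (by omega) (by omega)]; norm_num

-- ===== VERDICT (by name: the statement is the Claim_ definition above) =====
theorem population_rounder_spec : Claim_equal_population_rounder := by
  intro p hdom _
  have hub : p ≤ 2147483648 := by
    unfold Dom_population_rounder pvDomInt at hdom; simp at hdom; omega
  unfold Spec_population_rounder population_rounder population_rounder_alt
  simp only [PySem.List.enumerate]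
  by_cases hlt : p < 100
  · -- every guard p >= value fails; A falls through to str(p), B takes the < 100 branch
    simp [pvAGo, hlt, show ¬ p ≥ 100 by omega, show ¬ p ≥ 1000 by omega,
      show ¬ p ≥ 1000000 by omega, show ¬ p ≥ 1000000000 by omega]
  · by_cases h9 : p ≥ 1000000000
    · rw [show pvDigits p = 10 from pvDigits_10 (by omega) (by omega)]
      simp [pvAGo, hlt, PySem.List.pyGet?, PySem.List.pyIdx?, h9,
        show p ≥ 100 by omega, show ¬ p < 1000 by omega,
        show p ≥ 1000 by omega, show ¬ p < 1000000 by omega,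
        show p ≥ 1000000 by omega, show ¬ p < 1000000000 by omega,
        PySem.Dict.get?, PySem.Dict.ofList, PySem.Dict.empty, PySem.Dict.update, PySem.Dict.items, PySem.Dict.insert, List.find?]
    · by_cases h6 : p ≥ 1000000
      · have hdig : pvDigits p = 7 ∨ pvDigits p = 8 ∨ pvDigits p = 9 := by
          by_cases a : p < 10000000
          · exact Or.inl (pvDigits_7 (by omega) (by omega))
          · by_cases b : p < 100000000
            · exact Or.inr (Or.inl (pvDigits_8 (by omega) (by omega)))
            · exact Or.inr (Or.inr (pvDigits_9 (by omega) (by omega)))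
        rcases hdig with h | h | h <;>
          simp [pvAGo, hlt, h, PySem.List.pyGet?, PySem.List.pyIdx?, h6,
            show ¬ p ≥ 1000000000 by omega, show p ≥ 100 by omega, show ¬ p < 1000 by omega,
            show p ≥ 1000 by omega, show ¬ p < 1000000 by omega, show p < 1000000000 by omega,
            PySem.Dict.get?, PySem.Dict.ofList, PySem.Dict.empty, PySem.Dict.update, PySem.Dict.items, PySem.Dict.insert, List.find?]
      · by_cases h3 : p ≥ 1000
        · have hdig : pvDigits p = 4 ∨ pvDigits p = 5 ∨ pvDigits p = 6 := by
            by_cases a : p < 10000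
            · exact Or.inl (pvDigits_4 (by omega) (by omega))
            · by_cases b : p < 100000
              · exact Or.inr (Or.inl (pvDigits_5 (by omega) (by omega)))
              · exact Or.inr (Or.inr (pvDigits_6 (by omega) (by omega)))
          rcases hdig with h | h | h <;>
            simp [pvAGo, hlt, h, PySem.List.pyGet?, PySem.List.pyIdx?, h3,
              show ¬ p ≥ 1000000000 by omega, show ¬ p ≥ 1000000 by omega,
              show p ≥ 100 by omega, show ¬ p < 1000 by omega, show p < 1000000 by omega,
              PySem.Dict.get?, PySem.Dict.ofList, PySem.Dict.empty, PySem.Dict.update, PySem.Dict.items, PySem.Dict.insert, List.find?]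
        · rw [show pvDigits p = 3 from pvDigits_3 (by omega) (by omega)]; norm_num
          simp [pvAGo, hlt, PySem.List.pyGet?, PySem.List.pyIdx?,
            show ¬ p ≥ 1000000000 by omega, show ¬ p ≥ 1000000 by omega,
            show ¬ p ≥ 1000 by omega, show p ≥ 100 by omega, show p < 1000 by omega,
            PySem.Dict.get?, PySem.Dict.ofList, PySem.Dict.empty, PySem.Dict.update, PySem.Dict.items, PySem.Dict.insert, List.find?]
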